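-- pv_equiv track=rewrite | github.com/emersonfelipesp/netbox-sdk | netbox_cli/ui/django_model_app.py | _match_version
-- ===== SOURCE A (Python) =====
-- def _match_version(api_version: str, tags: list[str]) -> str | None:
--     """Find the best build tag matching an ``API-Version`` header value.
--
--     ``api_version`` is e.g. ``"4.2"``; tags are e.g. ``["v4.5.5", "v4.2.1"]``.
--     """
--     prefix = f"v{api_version}."
--     for t in tags:
--         if t.startswith(prefix):
--             return t
--     major = api_version.split(".")[0]
--     major_prefix = f"v{major}."
--     for t in tags:
--         if t.startswith(major_prefix):
--             return t
--     return None
-- ===== SOURCE B (Python) =====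
-- def _match_version(api_version: str, tags: list[str]) -> str | None:
--     """Rank-and-minimize: collect every candidate tag as (rank, position, tag),
--     rank 0 for an exact-prefix match and 1 for a major-only match, then take
--     the lexicographic minimum."""
--     exact = f"v{api_version}."
--     major = f"v{api_version.split('.')[0]}."
--     ranked = [((0 if t.startswith(exact) else 1), i, t)
--               for i, t in enumerate(tags)
--               if t.startswith(exact) or t.startswith(major)]
--     return min(ranked)[2] if ranked else None
-- ===== Notes on version B (the rewrite author's own statement) =====
-- stated objective: alternative
-- what changed: Replaces A's two sequential scans with a rank-and-minimize scheme: one comprehension builds (rank, position, tag) candidates (rank 0 = exact prefix, 1 = major prefix) and the answer is the lexicographic minimum.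
import Mathlib
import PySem

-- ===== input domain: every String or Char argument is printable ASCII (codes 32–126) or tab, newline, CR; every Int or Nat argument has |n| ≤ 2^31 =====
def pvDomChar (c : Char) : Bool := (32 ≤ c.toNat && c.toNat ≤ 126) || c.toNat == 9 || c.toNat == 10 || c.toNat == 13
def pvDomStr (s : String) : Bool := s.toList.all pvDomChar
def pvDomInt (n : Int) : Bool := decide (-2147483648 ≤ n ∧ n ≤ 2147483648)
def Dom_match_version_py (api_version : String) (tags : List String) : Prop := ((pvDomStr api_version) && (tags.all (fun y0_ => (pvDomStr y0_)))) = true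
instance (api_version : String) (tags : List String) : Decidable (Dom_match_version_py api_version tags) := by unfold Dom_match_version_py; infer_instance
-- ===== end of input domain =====

-- B replaces A's two sequential scans by a rank-and-minimize scheme (candidates (rank,position,tag), answer = lexicographic min); return values only, no mutation.
-- ===== PORT A =====
-- 'for t in tags: if t.startswith(pfx): return t' (used for both of A's loops)
def mvFindA (pfx : String) (tags : List String) : Option String :=
  match tags with
  | [] => none
  | t :: rest => if PySem.Str.startswith t pfx then some t else mvFindA pfx rest

def match_version_py (api_version : String) (tags : List String) : Option String :=
  let pfx_ := "v" ++ api_version ++ "."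
  match mvFindA pfx_ tags with
  | some t => some t
  | none =>
    let major := (((PySem.Str.split? api_version ".").getD [])[0]?).getD ""   -- split('.') is never empty, so [0] never raises
    let major_prefix := "v" ++ major ++ "."
    mvFindA major_prefix tags

-- ===== PORT B =====
-- the comprehension over enumerate(tags): (rank, position, tag) for every candidate
def mvRanked (exact mpfx : String) (n : Nat) (tags : List String) : List (Nat × Nat × String) :=
  match tags with
  | [] => []
  | t :: rest =>
    if PySem.Str.startswith t exact || PySem.Str.startswith t mpfx then
      ((if PySem.Str.startswith t exact then 0 else 1), n, t) :: mvRanked exact mpfx (n + 1) rest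
    else mvRanked exact mpfx (n + 1) rest

-- Python's lexicographic '<' on the (rank, position, tag) triples
def mvLt (a b : Nat × Nat × String) : Bool :=
  decide (a.1 < b.1) || (a.1 == b.1 && (decide (a.2.1 < b.2.1) || (a.2.1 == b.2.1 && decide (a.2.2 < b.2.2))))

-- Python's min on a nonempty list: fold keeping the current minimum (first wins ties)
def mvMinFold (l : List (Nat × Nat × String)) (c : Nat × Nat × String) : Nat × Nat × String :=
  match l with
  | [] => c
  | x :: rest => mvMinFold rest (if mvLt x c then x else c)

def mvMin? (l : List (Nat × Nat × String)) : Option (Nat × Nat × String) :=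
  match l with
  | [] => none
  | h :: tl => some (mvMinFold tl h)

def match_version_py_alt (api_version : String) (tags : List String) : Option String :=
  let exact := "v" ++ api_version ++ "."
  let mpfx := "v" ++ ((((PySem.Str.split? api_version ".").getD [])[0]?).getD "") ++ "."
  match mvMin? (mvRanked exact mpfx 0 tags) with
  | some r => some r.2.2
  | none => none

-- ===== PRECONDITION & SPEC =====
def Spec_match_version_py (api_version : String) (tags : List String) (out : Option String) : Prop := out = match_version_py_alt api_version tags
instance (api_version : String) (tags : List String) (out : Option String) : Decidable (Spec_match_version_py api_version tags out) := by unfold Spec_match_version_py; infer_instance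

-- ===== CLAIM (what is proved, stated in full; the proofs are below) =====
def Claim_equal_match_version_py : Prop := ∀ (api_version : String) (tags : List String), Dom_match_version_py api_version tags → Spec_match_version_py api_version tags (match_version_py api_version tags)

-- ===== LEMMAS AND PROOFS =====

-- a rank-0 current minimum with a position below every remaining candidate stays the minimum
theorem mvMinFold_keep (e m : String) (rest : List String) :
    ∀ (n : Nat) (c : Nat × Nat × String), c.1 = 0 → c.2.1 < n →
      mvMinFold (mvRanked e m n rest) c = c := by
  induction rest with
  | nil => intro n c _ _; simp [mvRanked, mvMinFold]
  | cons t rest ih =>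
    intro n c h0 hlt
    obtain ⟨c1, c2, c3⟩ := c
    simp only at h0 hlt
    by_cases h : (PySem.Str.startswith t e || PySem.Str.startswith t m) = true
    · simp only [mvRanked, h, if_pos, mvMinFold]
      have hlt' : mvLt ((if PySem.Str.startswith t e then 0 else 1), n, t) (c1, c2, c3) = false := by
        simp only [mvLt, h0]
        split <;> simp <;> omega
      rw [hlt']
      simp only [if_neg Bool.false_ne_true]
      exact ih (n + 1) (c1, c2, c3) h0 (by show c2 < n + 1; omega)
    · simp only [mvRanked, if_neg h]
      exact ih (n + 1) (c1, c2, c3) h0 (by show c2 < n + 1; omega)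

-- folding from a rank-1 current minimum: the first exact-prefix tag wins, else the current stays
theorem mvMinFold_rank1 (e m : String) (rest : List String) :
    ∀ (n : Nat) (c : Nat × Nat × String), c.1 = 1 → c.2.1 < n →
      (mvMinFold (mvRanked e m n rest) c).2.2 =
        match mvFindA e rest with | some u => u | none => c.2.2 := by
  induction rest with
  | nil => intro n c _ _; simp [mvRanked, mvMinFold, mvFindA]
  | cons t rest ih =>
    intro n c h1 hlt
    obtain ⟨c1, c2, c3⟩ := c
    simp only at h1 hlt
    by_cases he : PySem.Str.startswith t e = true
    · -- exact match: candidate (0,n,t) takes over and stays the minimum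
      simp only [mvRanked, he, Bool.true_or, if_true, mvMinFold, mvFindA]
      have hwin : mvLt (0, n, t) (c1, c2, c3) = true := by
        simp [mvLt, h1]
      rw [hwin]; simp only [if_pos]
      rw [mvMinFold_keep e m rest (n + 1) (0, n, t) rfl (by show n < n + 1; omega)]
    · have he' : PySem.Str.startswith t e = false := eq_false_of_ne_true he
      by_cases hm : PySem.Str.startswith t m = true
      · -- major-only candidate: position too large to beat c; fold goes on with c
        simp only [mvRanked, he', hm, Bool.false_or, if_true, Bool.false_eq_true, if_false,
          mvMinFold, mvFindA]
        have hno : mvLt (1, n, t) (c1, c2, c3) = false := by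
          simp only [mvLt, h1]; simp; omega
        rw [hno]
        simp only [if_neg Bool.false_ne_true]
        exact ih (n + 1) (c1, c2, c3) h1 (by show c2 < n + 1; omega)
      · have hm' : PySem.Str.startswith t m = false := eq_false_of_ne_true hm
        simp only [mvRanked, he', hm', Bool.false_or, Bool.false_eq_true, if_false, mvFindA]
        exact ih (n + 1) (c1, c2, c3) h1 (by show c2 < n + 1; omega)

-- B's rank-and-minimize over candidates from position n equals A's two-scan answer
theorem mvMain (e m : String) (tags : List String) :
    ∀ (n : Nat),
      (match mvMin? (mvRanked e m n tags) with
       | some r => some r.2.2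
       | none => none) =
      (match mvFindA e tags with
       | some t => some t
       | none => mvFindA m tags) := by
  induction tags with
  | nil => intro n; simp [mvRanked, mvMin?, mvFindA]
  | cons t rest ih =>
    intro n
    by_cases he : PySem.Str.startswith t e = true
    · simp only [mvRanked, he, Bool.true_or, if_true, mvMin?, mvFindA]
      rw [mvMinFold_keep e m rest (n + 1) ((0 : Nat), n, t) rfl (by show n < n + 1; omega)]
    · have he' : PySem.Str.startswith t e = false := eq_false_of_ne_true he
      by_cases hm : PySem.Str.startswith t m = true
      · simp only [mvRanked, he', hm, Bool.false_or, if_true, Bool.false_eq_true, if_false,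
          mvMin?, mvFindA]
        rw [mvMinFold_rank1 e m rest (n + 1) ((1 : Nat), n, t) rfl (by show n < n + 1; omega)]
        cases mvFindA e rest <;> simp
      · have hm' : PySem.Str.startswith t m = false := eq_false_of_ne_true hm
        simp only [mvRanked, he', hm', Bool.false_or, Bool.false_eq_true, if_false, mvFindA]
        exact ih (n + 1)

-- ===== VERDICT (by name: the statement is the Claim_ definition above) =====
theorem match_version_py_spec : Claim_equal_match_version_py := by
  intro api_version tags _
  unfold Spec_match_version_py match_version_py match_version_py_alt
  exact (mvMain _ _ tags 0).symm
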